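-- pv_equiv track=rewrite | github.com/WithoutSounded/python-word_count_for_GSAT | fix_TAWAY.py | check_contain_only_english
-- ===== SOURCE A (Python) =====
-- def check_contain_only_english(check_str):
--     ctr = 0
--     for en in check_str:
--         if 97 <= ord(en) <= 122:
--             ctr += 0
--         elif 65 <= ord(en) <= 90:
--             ctr += 0
--         elif ord(en) == 39:
--             ctr += 0
--         else:
--             ctr += 1
--     if ctr != 0:
--         # Not only English
--         return True
--     else:
--         return False
-- ===== SOURCE B (Python) =====
-- import string
--
-- _ALLOWED = set(string.ascii_letters + "'")
--
-- def check_contain_only_english(check_str):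
--     # set difference: any distinct character outside the allowed alphabet?
--     return bool(set(check_str) - _ALLOWED)
-- ===== Notes on version B (the rewrite author's own statement) =====
-- stated objective: simpler
-- what changed: Replaced the explicit per-character categorization loop with a counter by building the set of distinct characters and taking one set difference against the allowed alphabet (ascii letters + apostrophe).
import Mathlib
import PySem

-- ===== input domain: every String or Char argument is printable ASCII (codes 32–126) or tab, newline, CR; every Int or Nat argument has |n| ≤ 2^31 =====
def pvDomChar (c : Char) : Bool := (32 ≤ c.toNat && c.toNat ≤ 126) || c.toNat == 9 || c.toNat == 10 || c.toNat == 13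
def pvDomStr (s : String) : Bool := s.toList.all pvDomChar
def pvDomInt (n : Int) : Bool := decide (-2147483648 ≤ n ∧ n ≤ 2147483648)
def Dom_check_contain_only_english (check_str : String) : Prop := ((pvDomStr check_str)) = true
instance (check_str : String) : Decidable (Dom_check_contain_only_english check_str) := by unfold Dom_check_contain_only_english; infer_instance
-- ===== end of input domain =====

-- B replaces the per-character counting loop with one set-difference of the string's
-- distinct characters against the allowed alphabet (objective: simpler).

-- ===== PORT A =====
def check_contain_only_english (check_str : String) : Bool :=
  let ctr : Int := check_str.toList.foldl (fun ctr en =>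
    if 97 ≤ (en.toNat : Int) ∧ (en.toNat : Int) ≤ 122 then ctr + 0
    else if 65 ≤ (en.toNat : Int) ∧ (en.toNat : Int) ≤ 90 then ctr + 0
    else if (en.toNat : Int) = 39 then ctr + 0
    else ctr + 1) 0
  if ctr ≠ 0 then true else false

-- ===== PORT B =====
-- _ALLOWED = set(string.ascii_letters + "'")
def pvAllowed : PySem.Set Char :=
  PySem.Set.ofList "abcdefghijklmnopqrstuvwxyzABCDEFGHIJKLMNOPQRSTUVWXYZ'".toList

-- bool(set(check_str) - _ALLOWED)
def check_contain_only_english_alt (check_str : String) : Bool :=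
  decide (PySem.Set.diff (PySem.Set.ofList check_str.toList) pvAllowed ≠ [])

-- ===== PRECONDITION & SPEC =====
def Spec_check_contain_only_english (check_str : String) (out : Bool) : Prop := out = check_contain_only_english_alt check_str
instance (check_str : String) (out : Bool) : Decidable (Spec_check_contain_only_english check_str out) := by unfold Spec_check_contain_only_english; infer_instance

-- ===== CLAIM (what is proved, stated in full; the proofs are below) =====
def Claim_equal_check_contain_only_english : Prop := ∀ (check_str : String), Dom_check_contain_only_english check_str → Spec_check_contain_only_english check_str (check_contain_only_english check_str)

-- ===== LEMMAS AND PROOFS =====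

-- "en is not an English letter or apostrophe" — the else-branch of A's loop
def pvBad (en : Char) : Bool :=
  !(decide (97 ≤ (en.toNat : Int) ∧ (en.toNat : Int) ≤ 122) ||
    decide (65 ≤ (en.toNat : Int) ∧ (en.toNat : Int) ≤ 90) ||
    decide ((en.toNat : Int) = 39))

theorem foldA_step (a : Int) (c : Char) :
    (if 97 ≤ (c.toNat : Int) ∧ (c.toNat : Int) ≤ 122 then a + 0
     else if 65 ≤ (c.toNat : Int) ∧ (c.toNat : Int) ≤ 90 then a + 0
     else if (c.toNat : Int) = 39 then a + 0
     else a + 1) = a + (if pvBad c = true then (1 : Int) else 0) := by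
  unfold pvBad
  by_cases h1 : 97 ≤ (c.toNat : Int) ∧ (c.toNat : Int) ≤ 122
  · simp [h1]
  · by_cases h2 : 65 ≤ (c.toNat : Int) ∧ (c.toNat : Int) ≤ 90
    · simp [h1, h2]
    · by_cases h3 : (c.toNat : Int) = 39
      · simp [h1, h2, h3]
      · have hb : (!(decide (97 ≤ (c.toNat : Int) ∧ (c.toNat : Int) ≤ 122) ||
            decide (65 ≤ (c.toNat : Int) ∧ (c.toNat : Int) ≤ 90) ||
            decide ((c.toNat : Int) = 39))) = true := by
          simp only [Bool.not_eq_true', Bool.or_eq_false_iff, decide_eq_false_iff_not]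
          exact ⟨⟨h1, h2⟩, h3⟩
        rw [if_neg h1, if_neg h2, if_neg h3, hb, if_pos rfl]

theorem foldA_eq (l : List Char) (a : Int) :
    l.foldl (fun ctr en =>
      if 97 ≤ (en.toNat : Int) ∧ (en.toNat : Int) ≤ 122 then ctr + 0
      else if 65 ≤ (en.toNat : Int) ∧ (en.toNat : Int) ≤ 90 then ctr + 0
      else if (en.toNat : Int) = 39 then ctr + 0
      else ctr + 1) a = a + (l.countP pvBad : Int) := by
  induction l generalizing a with
  | nil => simp
  | cons c t ih =>
    rw [List.foldl_cons, foldA_step, ih, List.countP_cons]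
    by_cases h : pvBad c = true <;> simp only [h, if_true, if_false] <;> push_cast <;> ring

set_option maxRecDepth 4000 in
theorem pvAllowed_fin :
    ∀ n : Fin 127, decide (Char.ofNat n.val ∈ pvAllowed) = ! pvBad (Char.ofNat n.val) := by
  decide

theorem pvAllowed_char (c : Char) (h : pvDomChar c = true) :
    (c ∈ pvAllowed) ↔ pvBad c = false := by
  have hlt : c.toNat < 127 := by
    simp only [pvDomChar, Bool.or_eq_true, Bool.and_eq_true, decide_eq_true_eq,
      beq_iff_eq] at h
    omega
  have hb := pvAllowed_fin ⟨c.toNat, hlt⟩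
  simp only [Char.ofNat_toNat] at hb
  have h' : (c ∈ pvAllowed) ↔ (! pvBad c) = true := by
    rw [← hb]; exact (decide_eq_true_iff).symm
  rw [h']
  cases pvBad c <;> simp

theorem check_contain_only_english_spec : Claim_equal_check_contain_only_english := by
  unfold Claim_equal_check_contain_only_english
  intro s hdom
  have hd : ∀ c ∈ s.toList, pvDomChar c = true := by
    unfold Dom_check_contain_only_english pvDomStr at hdom
    simpa [List.all_eq_true] using hdom
  unfold Spec_check_contain_only_english check_contain_only_english check_contain_only_english_alt
  have key : (PySem.Set.diff (PySem.Set.ofList s.toList) pvAllowed ≠ []) ↔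
      ∃ c ∈ s.toList, pvBad c = true := by
    rw [Ne, List.eq_nil_iff_forall_not_mem]
    push_neg
    constructor
    · rintro ⟨c, hc⟩
      rw [PySem.Set.mem_diff, PySem.Set.mem_ofList] at hc
      refine ⟨c, hc.1, ?_⟩
      rcases Bool.eq_false_or_eq_true (pvBad c) with hbv | hbv
      · exact hbv
      · exact absurd ((pvAllowed_char c (hd c hc.1)).mpr hbv) hc.2
    · rintro ⟨c, hc, hbad⟩
      exact ⟨c, (PySem.Set.mem_diff _ _ _).mpr ⟨(PySem.Set.mem_ofList _ _).mpr hc,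
        fun hm => by simp [(pvAllowed_char c (hd c hc)).mp hm] at hbad⟩⟩
  rw [foldA_eq, Bool.eq_iff_iff]
  constructor
  · intro hA
    by_cases h0 : s.toList.countP pvBad = 0
    · rw [h0] at hA; norm_num at hA
    · obtain ⟨c, hc, hbc⟩ := List.countP_pos_iff.mp (Nat.pos_of_ne_zero h0)
      exact decide_eq_true (key.mpr ⟨c, hc, hbc⟩)
  · intro hB
    obtain ⟨c, hc, hbc⟩ := key.mp (of_decide_eq_true hB)
    have hpos : 0 < s.toList.countP pvBad := List.countP_pos_iff.mpr ⟨c, hc, hbc⟩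
    have h2 : (0 : Int) + (s.toList.countP pvBad : Int) ≠ 0 := by
      have := Int.natCast_ne_zero.mpr hpos.ne'
      omega
    rw [if_pos h2]
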